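-- pv_equiv track=rewrite | github.com/feststelltaste/asm-glossary | scripts/generate_images.py | extract_blockquote
-- ===== SOURCE A (Python) =====
-- def extract_blockquote(text: str) -> str:
--     """Return the first blockquote (> …) stripped of the leading >."""
--     lines = []
--     in_quote = False
--     for line in text.splitlines():
--         if line.startswith(">"):
--             lines.append(line[1:].strip())
--             in_quote = True
--         elif in_quote:
--             break
--     return " ".join(lines)
-- ===== SOURCE B (Python) =====
-- def extract_blockquote(text: str) -> str:
--     """Return the first blockquote (> ...) stripped of the leading >."""
--     lines = text.splitlines()
--     n = len(lines)
--     i = 0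
--     while i < n and not lines[i].startswith(">"):
--         i += 1
--     j = i
--     while j < n and lines[j].startswith(">"):
--         j += 1
--     return " ".join(line[1:].strip() for line in lines[i:j])
-- ===== Notes on version B (the rewrite author's own statement) =====
-- stated objective: alternative
-- what changed: Replaces A's single stateful scan (boolean in_quote flag, append-as-you-go, break) with a two-phase boundary search: two index loops locate the start and end of the first contiguous run of quote-marker lines, then the slice lines[i:j] is mapped and joined in one expression.
import Mathlib
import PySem

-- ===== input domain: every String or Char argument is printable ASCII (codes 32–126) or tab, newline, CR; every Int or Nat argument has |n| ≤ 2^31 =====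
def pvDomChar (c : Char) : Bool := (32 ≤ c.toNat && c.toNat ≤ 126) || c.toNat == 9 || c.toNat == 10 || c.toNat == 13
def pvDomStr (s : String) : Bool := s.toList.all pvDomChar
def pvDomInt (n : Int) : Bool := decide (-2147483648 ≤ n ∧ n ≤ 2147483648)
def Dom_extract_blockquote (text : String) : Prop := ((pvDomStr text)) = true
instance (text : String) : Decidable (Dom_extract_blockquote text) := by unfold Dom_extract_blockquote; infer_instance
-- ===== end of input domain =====

-- B replaces A's single stateful scan (in_quote flag + break) with a two-phase
-- boundary search (find start index, find end index, map over the slice); objective: alternative.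

-- ===== PORT A =====
-- the for-loop of A: state = (accumulated stripped lines, in_quote); 'break' = return acc
def pvALoop : List String → List String → Bool → List String
  | [], acc, _ => acc
  | l :: rest, acc, inq =>
    if PySem.Str.startswith l ">" then
      pvALoop rest (acc ++ [PySem.Str.strip (PySem.Str.slice l (some 1) none)]) true
    else if inq then acc
    else pvALoop rest acc inq

def extract_blockquote (text : String) : String :=
  PySem.Str.join " " (pvALoop (PySem.Str.splitlines text) [] false)

-- ===== PORT B =====
-- first while loop of B: advance i past leading non-'>' lines
def pvBSkip : List String → Nat → Nat
  | [], i => i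
  | l :: rest, i => if PySem.Str.startswith l ">" then i else pvBSkip rest (i + 1)

-- second while loop of B: advance j over the contiguous '>' lines
def pvBEnd : List String → Nat → Nat
  | [], j => j
  | l :: rest, j => if PySem.Str.startswith l ">" then pvBEnd rest (j + 1) else j

def extract_blockquote_alt (text : String) : String :=
  let lines := PySem.Str.splitlines text
  let i := pvBSkip lines 0
  let j := pvBEnd (lines.drop i) i
  PySem.Str.join " "
    ((PySem.List.slice lines (some (i : Int)) (some (j : Int))).map
      (fun l => PySem.Str.strip (PySem.Str.slice l (some 1) none)))

-- ===== PRECONDITION & SPEC =====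
def Spec_extract_blockquote (text : String) (out : String) : Prop := out = extract_blockquote_alt text
instance (text : String) (out : String) : Decidable (Spec_extract_blockquote text out) := by unfold Spec_extract_blockquote; infer_instance

-- ===== CLAIM (what is proved, stated in full; the proofs are below) =====
def Claim_equal_extract_blockquote : Prop := ∀ (text : String), Dom_extract_blockquote text → Spec_extract_blockquote text (extract_blockquote text)

-- ===== LEMMAS AND PROOFS =====

theorem pvALoop_true (ls : List String) (acc : List String) :
    pvALoop ls acc true =
      acc ++ (ls.takeWhile (fun l => PySem.Str.startswith l ">")).map
        (fun l => PySem.Str.strip (PySem.Str.slice l (some 1) none)) := by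
  induction ls generalizing acc with
  | nil => simp [pvALoop]
  | cons l rest ih =>
    by_cases h : PySem.Chars.startswith l.toList ['>'] = true
    · simp [pvALoop, h, ih]
    · simp [pvALoop, h]

theorem pvALoop_false (ls : List String) (acc : List String) :
    pvALoop ls acc false =
      acc ++ ((ls.dropWhile (fun l => !PySem.Str.startswith l ">")).takeWhile
          (fun l => PySem.Str.startswith l ">")).map
        (fun l => PySem.Str.strip (PySem.Str.slice l (some 1) none)) := by
  induction ls generalizing acc with
  | nil => simp [pvALoop]
  | cons l rest ih =>
    by_cases h : PySem.Chars.startswith l.toList ['>'] = true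
    · simp [pvALoop, h, pvALoop_true]
    · simp [pvALoop, h, ih]

theorem pvBSkip_eq (ls : List String) (i : Nat) :
    pvBSkip ls i = i + (ls.takeWhile (fun l => !PySem.Str.startswith l ">")).length := by
  induction ls generalizing i with
  | nil => simp [pvBSkip]
  | cons l rest ih =>
    by_cases h : PySem.Chars.startswith l.toList ['>'] = true
    · simp [pvBSkip, h]
    · simp [pvBSkip, h, ih]
      omega

theorem pvBEnd_eq (ls : List String) (j : Nat) :
    pvBEnd ls j = j + (ls.takeWhile (fun l => PySem.Str.startswith l ">")).length := by
  induction ls generalizing j with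
  | nil => simp [pvBEnd]
  | cons l rest ih =>
    by_cases h : PySem.Chars.startswith l.toList ['>'] = true
    · simp [pvBEnd, h, ih]
      omega
    · simp [pvBEnd, h]

-- dropping the leading segment counted by takeWhile is exactly dropWhile
theorem drop_takeWhile_length {α : Type} (p : α → Bool) (ls : List α) :
    ls.drop (ls.takeWhile p).length = ls.dropWhile p := by
  induction ls with
  | nil => simp
  | cons a l ih =>
    by_cases h : p a <;>
      simp [h, ih]

theorem take_takeWhile_length {α : Type} (p : α → Bool) (ls : List α) :
    ls.take (ls.takeWhile p).length = ls.takeWhile p := by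
  exact (List.prefix_iff_eq_take.mp (List.takeWhile_prefix p)).symm

-- ===== VERDICT (by name: the statement is the Claim_ definition above) =====
theorem extract_blockquote_spec : Claim_equal_extract_blockquote := by
  intro text _
  unfold Spec_extract_blockquote extract_blockquote extract_blockquote_alt
  simp only [pvALoop_false, pvBSkip_eq, pvBEnd_eq, Nat.zero_add, List.nil_append,
    drop_takeWhile_length, Nat.cast_add, PySem.List.slice_natCast_add,
    take_takeWhile_length]
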